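-- pv_equiv track=rewrite | github.com/davidsitzes/splunk-docker | file_sharing/splunk-it-service-intelligence_312/SA-ITOA/lib/itsi/itsi_utils.py | trim_dict
-- ===== SOURCE A (Python) =====
-- def trim_dict(obj_as_dict, remove_fields):
--     '''
--     From a given dictionary, remove fields we dont want...
--     @param json_obj - dictionary to work on
--     @param remove_fields - list of fields to remove
--     @return set of fields that were removed...
--     '''
--     set_of_removed = set()
--
--     if any([
--         not isinstance(obj_as_dict, dict),
--         isinstance(obj_as_dict, dict) and len(obj_as_dict) == 0,
--         len(remove_fields) == 0
--         ]):
--         return set_of_removed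
--
--     for field in remove_fields:
--         removed_field = obj_as_dict.pop(field, None)
--         if removed_field is not None:
--             set_of_removed.add(removed_field)
--     return set_of_removed
-- ===== SOURCE B (Python) =====
-- def trim_dict(obj_as_dict, remove_fields):
--     '''Same result as A: set of values removed from obj_as_dict for keys in remove_fields.
--     Two phases instead of A's interleaved pop-and-collect: a pure set comprehension over
--     lookups in the untouched dict, then a separate deletion pass (mutates obj_as_dict like A).'''
--     if not isinstance(obj_as_dict, dict) or not obj_as_dict or not remove_fields:
--         return set()
--     removed = {obj_as_dict[f] for f in remove_fields if f in obj_as_dict}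
--     for f in remove_fields:
--         obj_as_dict.pop(f, None)
--     return removed
-- ===== Notes on version B (the rewrite author's own statement) =====
-- stated objective: simpler
-- what changed: B replaces A's interleaved pop-and-collect loop (mutating the dict while building the set with a None sentinel) by a pure set comprehension over lookups in the untouched dict followed by a separate deletion pass.
import Mathlib
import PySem

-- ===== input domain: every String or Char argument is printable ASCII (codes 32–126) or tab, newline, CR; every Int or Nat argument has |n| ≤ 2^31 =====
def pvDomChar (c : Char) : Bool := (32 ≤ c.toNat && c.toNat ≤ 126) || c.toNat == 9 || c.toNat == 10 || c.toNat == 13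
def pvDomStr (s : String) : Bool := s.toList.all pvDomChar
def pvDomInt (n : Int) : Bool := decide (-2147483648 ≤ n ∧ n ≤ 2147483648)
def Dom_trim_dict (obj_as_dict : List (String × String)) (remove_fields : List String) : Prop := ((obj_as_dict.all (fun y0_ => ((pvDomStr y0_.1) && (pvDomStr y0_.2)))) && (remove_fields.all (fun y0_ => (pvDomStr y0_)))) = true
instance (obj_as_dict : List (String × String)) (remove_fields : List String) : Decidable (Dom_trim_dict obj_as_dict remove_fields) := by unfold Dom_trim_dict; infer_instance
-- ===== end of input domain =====

-- B: two phases (pure comprehension over lookups, then delete) instead of A's interleaved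
-- pop-and-collect loop; same return value. Both Pythons mutate obj_as_dict identically
-- (keys in remove_fields deleted); the equivalence proved here is about the return value.

-- ===== PORT A =====
-- The `not isinstance(obj_as_dict, dict)` disjunct of A's guard cannot fire under the typed
-- signature (obj_as_dict is always a dict) and contributes nothing here.
def trim_dict (obj_as_dict : List (String × String)) (remove_fields : List String) : List String :=
  let set_of_removed : PySem.Set String := PySem.Set.empty
  if obj_as_dict.length = 0 ∨ remove_fields.length = 0 then set_of_removed
  else
    (remove_fields.foldl
      (fun (st : PySem.Dict String String × PySem.Set String) field =>
        -- removed_field = obj_as_dict.pop(field, None); if removed_field is not None: add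
        -- (values are strings, never None, so a successful pop is always added)
        match PySem.Dict.get? st.1 field with
        | some v => (PySem.Dict.erase st.1 field, PySem.Set.add st.2 v)
        | none => st)
      (PySem.Dict.mk obj_as_dict, set_of_removed)).2

-- ===== PORT B =====
-- {obj_as_dict[f] for f in remove_fields if f in obj_as_dict}: the membership test plus
-- indexing of the comprehension is exactly `get? = some`, fused here as filterMap get?.
-- B's deletion pass touches only the (unreturned) dict and has no Lean counterpart.
def trim_dict_alt (obj_as_dict : List (String × String)) (remove_fields : List String) : List String :=
  if obj_as_dict.length = 0 ∨ remove_fields.length = 0 then []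
  else PySem.Set.ofList
    (remove_fields.filterMap (fun f => PySem.Dict.get? (PySem.Dict.mk obj_as_dict) f))

-- ===== PRECONDITION & SPEC =====
def Spec_trim_dict (obj_as_dict : List (String × String)) (remove_fields : List String) (out : List String) : Prop := out = trim_dict_alt obj_as_dict remove_fields
instance (obj_as_dict : List (String × String)) (remove_fields : List String) (out : List String) : Decidable (Spec_trim_dict obj_as_dict remove_fields out) := by unfold Spec_trim_dict; infer_instance

-- ===== CLAIM (what is proved, stated in full; the proofs are below) =====
def Claim_equal_trim_dict : Prop := ∀ (obj_as_dict : List (String × String)) (remove_fields : List String), Dom_trim_dict obj_as_dict remove_fields → Spec_trim_dict obj_as_dict remove_fields (trim_dict obj_as_dict remove_fields)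

-- ===== LEMMAS AND PROOFS =====

theorem get?_erase_pv (d : PySem.Dict String String) (k k' : String) :
    (d.erase k).get? k' = if k' = k then none else d.get? k' := by
  cases d with | mk items =>
  induction items with
  | nil => simp [PySem.Dict.erase, PySem.Dict.get?]
  | cons p t ih =>
    simp only [PySem.Dict.erase, PySem.Dict.get?, List.filter_cons] at ih ⊢
    by_cases hk : p.1 = k <;> by_cases hk' : p.1 = k' <;>
      simp_all

-- A's loop state (current dict, accumulated set) versus B's fold over the ORIGINAL dict's
-- lookups: any key A has already erased had its value added to the set, so B's duplicate
-- lookup is absorbed by Set.add.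
theorem trim_loop (d0 : PySem.Dict String String) (rf : List String) :
    ∀ (d : PySem.Dict String String) (s : PySem.Set String),
    (∀ f v, d.get? f = some v → d0.get? f = some v) →
    (∀ f v, d0.get? f = some v → d.get? f = none → v ∈ s) →
    (rf.foldl
      (fun (st : PySem.Dict String String × PySem.Set String) field =>
        match PySem.Dict.get? st.1 field with
        | some v => (PySem.Dict.erase st.1 field, PySem.Set.add st.2 v)
        | none => st) (d, s)).2
      = List.foldl PySem.Set.add s (rf.filterMap (fun f => PySem.Dict.get? d0 f)) := by
  induction rf with
  | nil => intro d s _ _; rfl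
  | cons f t ih =>
    intro d s inv1 inv2
    simp only [List.foldl_cons, List.filterMap_cons]
    cases hd : PySem.Dict.get? d f with
    | none =>
      cases h0 : PySem.Dict.get? d0 f with
      | none => exact ih d s inv1 inv2
      | some v =>
        have hv : v ∈ s := inv2 f v h0 hd
        simp only [List.foldl_cons, PySem.Set.add_of_mem hv]
        exact ih d s inv1 inv2
    | some v =>
      have h0 : PySem.Dict.get? d0 f = some v := inv1 f v hd
      simp only [h0, List.foldl_cons]
      refine ih (d.erase f) (s.add v) ?_ ?_
      · intro g w hg
        rw [get?_erase_pv] at hg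
        split at hg
        · cases hg
        · exact inv1 g w hg
      · intro g w hg hn
        rw [get?_erase_pv] at hn
        by_cases hgf : g = f
        · subst hgf
          rw [h0] at hg
          cases hg
          exact (PySem.Set.mem_add s v v).2 (Or.inr rfl)
        · rw [if_neg hgf] at hn
          exact (PySem.Set.mem_add s v w).2 (Or.inl (inv2 g w hg hn))

-- ===== VERDICT (by name: the statement is the Claim_ definition above) =====
theorem trim_dict_spec : Claim_equal_trim_dict := by
  intro obj rf _
  unfold Spec_trim_dict trim_dict trim_dict_alt
  split
  · rfl
  · rw [PySem.Set.ofList_eq_foldl]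
    exact trim_loop (PySem.Dict.mk obj) rf (PySem.Dict.mk obj) PySem.Set.empty
      (fun f v h => h)
      (fun f v h hn => by rw [h] at hn; cases hn)
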